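-- pv_equiv track=rewrite | github.com/RVDROU/NsiClaveille | files/1_NSI/Devoirs maison/DM4/correction/1NSI_DM_4_corrige.py | construireDict
-- ===== SOURCE A (Python) =====
-- def construireDict(listeLiaisons):
--     """ listeLiaisons est un tableau de tableaux représentant la liste des  liaisons d'un joueur comme décrit dans le problème
--     """
--     dictJoueur={}
--     for liaison in listeLiaisons :
--         villeA = liaison[0]
--         villeB = liaison[1]
--         if not villeA in dictJoueur.keys() :
--             dictJoueur[villeA]=[villeB]
--         else :
--             destinationsA = dictJoueur[villeA]
--             if not villeB in destinationsA :
--                 destinationsA.append(villeB)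
--     return dictJoueur
-- ===== SOURCE B (Python) =====
-- def construireDict(listeLiaisons):
--     # Two declarative passes, no in-place mutation: list the distinct origins
--     # in first-appearance order, then for each origin collect and deduplicate
--     # its destinations in first-appearance order.
--     villes = dict.fromkeys(row[0] for row in listeLiaisons)
--     return {a: list(dict.fromkeys(row[1] for row in listeLiaisons if row[0] == a))
--             for a in villes}
-- ===== Notes on version B (the rewrite author's own statement) =====
-- stated objective: alternative
-- what changed: A builds the dict in one loop with in-place mutation ('append if not already present' inside the loop); B is mutation-free and declarative: one comprehension lists the distinct origins in first-appearance order, then for each origin a second comprehension over the whole list collects its destinations and deduplicates them with dict.fromkeys.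
import Mathlib
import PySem

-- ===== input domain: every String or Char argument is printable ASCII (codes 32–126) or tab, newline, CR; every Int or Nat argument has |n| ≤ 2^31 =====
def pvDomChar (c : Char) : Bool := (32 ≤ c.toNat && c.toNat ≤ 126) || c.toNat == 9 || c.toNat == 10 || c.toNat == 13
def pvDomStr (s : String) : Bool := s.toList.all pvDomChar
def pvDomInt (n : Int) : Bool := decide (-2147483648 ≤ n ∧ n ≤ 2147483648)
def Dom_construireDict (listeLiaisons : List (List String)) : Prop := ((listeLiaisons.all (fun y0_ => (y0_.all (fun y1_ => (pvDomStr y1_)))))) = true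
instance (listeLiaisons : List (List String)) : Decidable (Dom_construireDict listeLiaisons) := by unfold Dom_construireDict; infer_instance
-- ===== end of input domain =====

-- B replaces A's single mutating loop (dict with an inline "append if absent" branch) by two
-- declarative passes: distinct origins in first-appearance order, then per-origin collect+dedup.

-- ===== PORT A =====
-- One iteration of A's for-loop; liaison[0]/liaison[1] via pyGet? (none = IndexError,
-- excluded by Pre_; the port then leaves the dict unchanged).
def pvStepA (d : PySem.Dict String (List String)) (liaison : List String) :
    PySem.Dict String (List String) :=
  match PySem.List.pyGet? liaison 0, PySem.List.pyGet? liaison 1 with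
  | some villeA, some villeB =>
    if !(d.contains villeA) then
      d.insert villeA [villeB]
    else
      let destinationsA := d.getD villeA []
      if !(destinationsA.contains villeB) then
        d.insert villeA (destinationsA ++ [villeB])   -- destinationsA.append(villeB), in place
      else d
  | _, _ => d

def construireDict (listeLiaisons : List (List String)) : List (String × List String) :=
  (listeLiaisons.foldl pvStepA PySem.Dict.empty).items

-- ===== PORT B =====
-- villes = dict.fromkeys(row[0] for row in listeLiaisons)  → PySem.List.dedup of the row[0]s
-- (rows where row[0] raises IndexError are excluded by Pre_; the port skips them).
def pvVillesB (listeLiaisons : List (List String)) : List String :=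
  PySem.List.dedup (listeLiaisons.filterMap (fun row => PySem.List.pyGet? row 0))

-- list(dict.fromkeys(row[1] for row in listeLiaisons if row[0] == a))
def pvDestsB (listeLiaisons : List (List String)) (a : String) : List String :=
  PySem.List.dedup (listeLiaisons.filterMap (fun row =>
    match PySem.List.pyGet? row 0, PySem.List.pyGet? row 1 with
    | some x, some y => if x == a then some y else none
    | _, _ => none))

def construireDict_alt (listeLiaisons : List (List String)) : List (String × List String) :=
  (pvVillesB listeLiaisons).map (fun a => (a, pvDestsB listeLiaisons a))

-- ===== PRECONDITION & SPEC =====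
-- Pre_ excludes inputs containing a liaison of fewer than two entries, on which A
-- (and B) raise IndexError.
def Pre_construireDict (listeLiaisons : List (List String)) : Prop :=
  ∀ row ∈ listeLiaisons, 2 ≤ row.length
instance (listeLiaisons : List (List String)) : Decidable (Pre_construireDict listeLiaisons) := by
  unfold Pre_construireDict; infer_instance

def pvWitness_construireDict : List (List String) :=
  [["a", "b"], ["a", "c"], ["a", "b"], ["d", "b"]]

def Spec_construireDict (listeLiaisons : List (List String)) (out : List (String × List String)) : Prop :=
  out = construireDict_alt listeLiaisons
instance (listeLiaisons : List (List String)) (out : List (String × List String)) : Decidable (Spec_construireDict listeLiaisons out) := by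
  unfold Spec_construireDict; infer_instance

-- ===== CLAIM (what is proved, stated in full; the proofs are below) =====
def Claim_equal_construireDict : Prop := ∀ (listeLiaisons : List (List String)), Dom_construireDict listeLiaisons → Pre_construireDict listeLiaisons → Spec_construireDict listeLiaisons (construireDict listeLiaisons)

-- ===== LEMMAS AND PROOFS =====

-- the (origin, destination) pairs of the rows on which both indexings succeed
def pvPairs (listeLiaisons : List (List String)) : List (String × String) :=
  listeLiaisons.filterMap (fun row =>
    match PySem.List.pyGet? row 0, PySem.List.pyGet? row 1 with
    | some x, some y => some (x, y)
    | _, _ => none)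

-- A's loop body, on a pair
def pvPairStep (d : PySem.Dict String (List String)) (q : String × String) :
    PySem.Dict String (List String) :=
  if !(d.contains q.1) then
    d.insert q.1 [q.2]
  else
    let dest := d.getD q.1 []
    if !(dest.contains q.2) then d.insert q.1 (dest ++ [q.2]) else d

-- closed form of A's dict after processing the pair list p
def pvSpec (p : List (String × String)) : List (String × List String) :=
  (PySem.Set.ofList (p.map Prod.fst)).map
    (fun a => (a, PySem.Set.ofList ((p.filter (fun q => q.1 == a)).map Prod.snd)))

theorem pvFoldA_eq_pairs (xs : List (List String)) (d : PySem.Dict String (List String)) :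
    xs.foldl pvStepA d = (pvPairs xs).foldl pvPairStep d := by
  induction xs generalizing d with
  | nil => rfl
  | cons row rest ih =>
      simp only [List.foldl_cons, pvPairs, List.filterMap_cons]
      cases h0 : PySem.List.pyGet? row 0 <;> cases h1 : PySem.List.pyGet? row 1 <;>
        simp only [pvStepA, h0, h1, pvPairs] at ih ⊢ <;>
        first
          | exact ih d
          | exact (List.foldl_cons .. ▸ ih _)

theorem pvSpec_keys (D : PySem.Dict String (List String)) (p : List (String × String))
    (h : D.items = pvSpec p) : D.keys = PySem.Set.ofList (p.map Prod.fst) := by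
  simp [PySem.Dict.keys, h, pvSpec, List.map_map, Function.comp_def]

theorem pvSpec_contains (D : PySem.Dict String (List String)) (p : List (String × String))
    (h : D.items = pvSpec p) (a : String) :
    D.contains a = true ↔ a ∈ p.map Prod.fst := by
  rw [PySem.Dict.contains_eq_decide_mem_keys, pvSpec_keys D p h]
  simp [PySem.Set.mem_ofList]

theorem pvSpec_nodup (D : PySem.Dict String (List String)) (p : List (String × String))
    (h : D.items = pvSpec p) : D.keys.Nodup := by
  rw [pvSpec_keys D p h]; exact PySem.Set.nodup_ofList _

theorem pvSpec_getD (D : PySem.Dict String (List String)) (p : List (String × String))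
    (h : D.items = pvSpec p) (a : String) (ha : a ∈ p.map Prod.fst) :
    D.getD a [] = PySem.Set.ofList ((p.filter (fun q => q.1 == a)).map Prod.snd) := by
  apply PySem.Dict.getD_of_mem_items
  · rw [h]
    exact List.mem_map_of_mem (by rw [PySem.Set.mem_ofList]; exact ha)
  · exact pvSpec_nodup D p h

theorem pvFilter_eq_nil (p : List (String × String)) (a : String)
    (ha : a ∉ p.map Prod.fst) : p.filter (fun q => q.1 == a) = [] := by
  rw [List.filter_eq_nil_iff]
  intro q hq
  simp only [beq_iff_eq]
  intro hqa
  have hmem := List.mem_map_of_mem (f := Prod.fst) hq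
  rw [hqa] at hmem
  exact ha hmem

theorem pvFilter_append_self (p : List (String × String)) (q : String × String) :
    (p ++ [q]).filter (fun r => r.1 == q.1) = p.filter (fun r => r.1 == q.1) ++ [q] := by
  rw [List.filter_append]; simp

theorem pvFilter_append_ne (p : List (String × String)) (q : String × String) (a : String)
    (hqa : q.1 ≠ a) :
    (p ++ [q]).filter (fun r => r.1 == a) = p.filter (fun r => r.1 == a) := by
  rw [List.filter_append]; simp [hqa]

theorem pvPairStep_spec (D : PySem.Dict String (List String)) (p : List (String × String))
    (q : String × String) (h : D.items = pvSpec p) :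
    (pvPairStep D q).items = pvSpec (p ++ [q]) := by
  have hfst : (p ++ [q]).map Prod.fst = p.map Prod.fst ++ [q.1] := by simp
  unfold pvPairStep
  by_cases hc : q.1 ∈ p.map Prod.fst
  · have hct : D.contains q.1 = true := (pvSpec_contains D p h q.1).mpr hc
    have hget := pvSpec_getD D p h q.1 hc
    simp only [hct, Bool.not_true, Bool.false_eq_true, if_false]
    have hkey : PySem.Set.ofList ((p ++ [q]).map Prod.fst) = PySem.Set.ofList (p.map Prod.fst) := by
      rw [hfst, PySem.Set.ofList_append_singleton,
          PySem.Set.add_of_mem (by rw [PySem.Set.mem_ofList]; exact hc)]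
    by_cases hm : q.2 ∈ (p.filter (fun r => r.1 == q.1)).map Prod.snd
    · -- destination already present: A leaves D unchanged, the spec entry is unchanged too
      have hmt : (D.getD q.1 []).contains q.2 = true := by
        simp [hget, PySem.Set.mem_ofList, hm]
      simp only [hmt, Bool.not_true, Bool.false_eq_true, if_false, h]
      unfold pvSpec
      rw [hkey]
      apply List.map_congr_left
      intro a _
      by_cases hqa : q.1 = a
      · subst hqa
        rw [pvFilter_append_self]
        simp only [List.map_append, List.map_cons, List.map_nil]
        rw [PySem.Set.ofList_append_singleton,
            PySem.Set.add_of_mem (by rw [PySem.Set.mem_ofList]; exact hm)]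
      · rw [pvFilter_append_ne p q a hqa]
    · -- new destination: A appends it in place at key q.1
      have hmf : (D.getD q.1 []).contains q.2 = false := by
        rw [hget, Bool.eq_false_iff]
        intro hcon
        exact hm ((PySem.Set.mem_ofList _ _).mp (List.contains_iff_mem.mp hcon))
      simp only [hmf, Bool.not_false, if_pos]
      rw [PySem.Dict.items_insert_of_contains _ _ hct, h]
      unfold pvSpec
      rw [hkey, List.map_map]
      apply List.map_congr_left
      intro a _
      by_cases hqa : q.1 = a
      · subst hqa
        simp only [Function.comp_def, beq_self_eq_true, if_true]
        rw [pvFilter_append_self]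
        simp only [List.map_append, List.map_cons, List.map_nil]
        rw [PySem.Set.ofList_append_singleton, hget,
            PySem.Set.add_of_not_mem (by rw [PySem.Set.mem_ofList]; exact hm)]
      · have hne : (a == q.1) = false := beq_eq_false_iff_ne.mpr (fun e => hqa e.symm)
        rw [pvFilter_append_ne p q a hqa]
        simp only [Function.comp_def, hne, Bool.false_eq_true, if_false]
  · -- fresh origin: A appends a new entry, the spec gains a new key at the end
    have hcf : D.contains q.1 = false := by
      cases hcc : D.contains q.1
      · rfl
      · exact absurd ((pvSpec_contains D p h q.1).mp hcc) hc
    simp only [hcf, Bool.not_false, if_pos]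
    rw [PySem.Dict.items_insert_of_not_contains _ _ hcf, h]
    unfold pvSpec
    rw [hfst, PySem.Set.ofList_append_singleton,
        PySem.Set.add_of_not_mem (by rw [PySem.Set.mem_ofList]; exact hc)]
    simp only [List.map_append, List.map_cons, List.map_nil]
    congr 1
    · apply List.map_congr_left
      intro a ha
      have haf : a ∈ p.map Prod.fst := by rw [PySem.Set.mem_ofList] at ha; exact ha
      rw [pvFilter_append_ne p q a (fun e => hc (e ▸ haf))]
    · rw [pvFilter_append_self, pvFilter_eq_nil p q.1 hc]
      simp [PySem.Set.ofList, PySem.Set.add]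

theorem pvFold_spec (p : List (String × String)) :
    (p.foldl pvPairStep PySem.Dict.empty).items = pvSpec p := by
  induction p using List.reverseRecOn with
  | nil => rfl
  | append_singleton p q ih =>
      rw [List.foldl_append, List.foldl_cons, List.foldl_nil]
      exact pvPairStep_spec _ p q ih

-- Under Pre_, B's origin pass lists exactly the first components of pvPairs …
theorem pvVilles_eq (xs : List (List String)) (hp : ∀ row ∈ xs, 2 ≤ row.length) :
    xs.filterMap (fun row => PySem.List.pyGet? row 0) = (pvPairs xs).map Prod.fst := by
  induction xs with
  | nil => rfl
  | cons row rest ih =>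
      have h2 := hp row (List.mem_cons_self)
      match row, h2 with
      | x :: y :: t, _ =>
        have h0 : PySem.List.pyGet? (x :: y :: t) 0 = some x := by
          simp [PySem.List.pyGet?, PySem.List.pyIdx?, show (0:Int) ≤ ↑t.length + 1 by omega]
        have h1 : PySem.List.pyGet? (x :: y :: t) 1 = some y := by
          simp [PySem.List.pyGet?, PySem.List.pyIdx?]
        simp only [pvPairs, List.filterMap_cons, h0, h1]
        simpa [pvPairs] using ih (fun r hr => hp r (List.mem_cons_of_mem _ hr))

-- … and B's per-origin pass is the filtered second components of pvPairs (no Pre_ needed).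
theorem pvDests_eq (xs : List (List String)) (a : String) :
    xs.filterMap (fun row =>
      match PySem.List.pyGet? row 0, PySem.List.pyGet? row 1 with
      | some x, some y => if x == a then some y else none
      | _, _ => none)
    = ((pvPairs xs).filter (fun q => q.1 == a)).map Prod.snd := by
  induction xs with
  | nil => rfl
  | cons row rest ih =>
      simp only [pvPairs, List.filterMap_cons] at ih ⊢
      cases h0 : PySem.List.pyGet? row 0 <;> cases h1 : PySem.List.pyGet? row 1 <;>
        simp only [ih]
      rename_i x y
      by_cases hxa : (x == a) = true
      · simp [hxa]
      · simp [Bool.eq_false_iff.mpr hxa]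

-- ===== VERDICT (by name: the statement is the Claim_ definition above) =====
theorem construireDict_spec : Claim_equal_construireDict := by
  intro xs _ hpre
  unfold Spec_construireDict construireDict construireDict_alt pvVillesB
  rw [pvFoldA_eq_pairs, pvFold_spec, pvVilles_eq xs hpre]
  simp only [pvSpec, PySem.List.dedup_eq_ofList]
  apply List.map_congr_left
  intro a _
  unfold pvDestsB
  rw [pvDests_eq, PySem.List.dedup_eq_ofList]
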